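-- pv_equiv track=rewrite | github.com/NalinSa/Com-Prog-PYTHON-2020 | g8.31.py | pay
-- ===== SOURCE A (Python) =====
-- def pay(pocket, amt):
--     y = dict(pocket)
--     x = sorted(pocket)[::-1]
--     j = 0
--     t = False
--     dic = {}
--     while amt>0:
--         r = 0
--         for key in pocket:
--             if key <= amt:
--                 r += pocket[key]
--         if r == 0:
--             t = True
--             break
--         if x[j]>amt:
--             j += 1
--         else:
--             if pocket[x[j]]>0:
--                 amt -= x[j]
--                 pocket[x[j]] -= 1
--                 if x[j] in dic:
--                     dic[x[j]] += 1
--                 else: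
--                     dic[x[j]] = 1
--             else:
--                 j += 1
--     if t:
--         for key in y:
--             pocket[key] = y[key]
--         return {}
--     else:
--         return dic
-- ===== SOURCE B (Python) =====
-- def pay(pocket, amt):
--     res = {}
--     rem = amt
--     for d in sorted(pocket)[::-1]:
--         if rem <= 0:
--             break
--         if d <= 0:
--             break
--         k = min(pocket[d], rem // d)
--         if k > 0:
--             res[d] = k
--             rem -= k * d
--     return res if rem == 0 else {}
-- ===== Notes on version B (the rewrite author's own statement) =====
-- stated objective: faster
-- what changed: A's while-loop takes one coin per iteration and rescans the whole pocket to recompute availability each time; B makes a single descending pass over the sorted denominations taking min(count, remaining//denom) coins of each denomination at once.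
-- outside the precondition, e.g. on pay({1: 3, 2: -3}, 3): A returns {}, B returns {1: 3}; on pay({-1: 2}, 1): A returns {}, B returns {}
import Mathlib
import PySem

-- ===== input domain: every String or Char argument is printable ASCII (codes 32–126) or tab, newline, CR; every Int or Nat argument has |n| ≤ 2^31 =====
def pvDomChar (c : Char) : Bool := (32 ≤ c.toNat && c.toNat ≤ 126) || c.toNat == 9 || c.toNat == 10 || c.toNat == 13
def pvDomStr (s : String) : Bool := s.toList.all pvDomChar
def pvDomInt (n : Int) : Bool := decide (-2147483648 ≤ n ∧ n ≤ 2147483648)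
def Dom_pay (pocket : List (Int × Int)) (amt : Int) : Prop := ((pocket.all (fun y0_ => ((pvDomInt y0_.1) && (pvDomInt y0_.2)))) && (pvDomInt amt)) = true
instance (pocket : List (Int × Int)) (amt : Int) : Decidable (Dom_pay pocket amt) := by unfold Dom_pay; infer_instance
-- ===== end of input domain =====

-- B replaces A's coin-at-a-time while-loop by a single descending pass taking min(count, amt//denom)
-- per denomination at once. Equivalence is about the RETURN value only: A also mutates its pocket
-- dict in place (depleting counts on success), which B does not do.

-- ===== PORT A =====
-- r = 0; for key in pocket: if key <= amt: r += pocket[key]   (pocket[key] is an exact lookup of a present key = getD)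
def payAvail (p : PySem.Dict Int Int) (amt : Int) : Int :=
  p.keys.foldl (fun r key => if key ≤ amt then r + p.getD key 0 else r) 0

-- termination measure helper (not part of the Python): total remaining coins, one summand per distinct key
def pocketMeasure (p : PySem.Dict Int Int) : Nat :=
  ((PySem.Set.ofList p.keys).map (fun k => (p.getD k 0).toNat)).sum

theorem keys_insert_contained (p : PySem.Dict Int Int) (d v : Int)
    (h : p.contains d = true) : (p.insert d v).keys = p.keys := by
  have hit := PySem.Dict.items_insert_of_contains (d := p) (k := d) (v := v) h
  simp only [PySem.Dict.keys, hit, List.map_map]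
  apply List.map_congr_left
  intro q _
  by_cases hq : q.1 = d <;> simp [hq]

theorem sum_map_lt (ks : List Int) (f g : Int → Nat) (k : Int)
    (hnd : ks.Nodup) (hk : k ∈ ks)
    (hcong : ∀ x ∈ ks, x ≠ k → g x = f x) (hlt : g k < f k) :
    (ks.map g).sum < (ks.map f).sum := by
  induction ks with
  | nil => simp at hk
  | cons a t ih =>
      simp only [List.map_cons, List.sum_cons]
      rcases List.mem_cons.1 hk with rfl | hk'
      · have ht : ∀ x ∈ t, g x = f x := by
          intro x hx
          exact hcong x (List.mem_cons_of_mem _ hx) (fun he => (List.nodup_cons.1 hnd).1 (he ▸ hx))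
        have : (t.map g).sum = (t.map f).sum := by
          have : t.map g = t.map f := List.map_congr_left ht
          rw [this]
        omega
      · have ha : g a = f a := hcong a (List.mem_cons_self ..) (fun he => (List.nodup_cons.1 hnd).1 (he ▸ hk'))
        have := ih (List.nodup_cons.1 hnd).2 hk' (fun x hx hne => hcong x (List.mem_cons_of_mem _ hx) hne)
        omega

theorem pocketMeasure_insert_lt (p : PySem.Dict Int Int) (d v : Int)
    (hd : p.contains d = true) (hv : v.toNat < (p.getD d 0).toNat) :
    pocketMeasure (p.insert d v) < pocketMeasure p := by
  unfold pocketMeasure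
  rw [keys_insert_contained p d v hd]
  refine sum_map_lt _ _ _ d (PySem.Set.nodup_ofList _) ?_ ?_ ?_
  · rw [PySem.Set.mem_ofList]
    exact (PySem.Dict.contains_iff_mem_keys p d).1 hd
  · intro x _ hx
    rw [PySem.Dict.getD_insert_of_ne p v 0 hx]
  · rw [PySem.Dict.getD_insert_self p d v 0]; exact hv

-- A's while-loop, one recursive call per Python iteration.
-- x[j] out of range would be an IndexError in Python (unreachable under Pre_); we return dic.items there.
-- On r == 0 Python restores pocket and returns {}; mutation is not part of the return value, so: [].
def payLoop (x : List Int) (p : PySem.Dict Int Int) (j : Nat)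
    (dic : PySem.Dict Int Int) (amt : Int) : List (Int × Int) :=
  if amt > 0 then
    if payAvail p amt = 0 then []
    else
      match hx : x[j]? with
      | none => dic.items
      | some d =>
        if d > amt then payLoop x p (j+1) dic amt
        else if p.getD d 0 > 0 then
          payLoop x (p.insert d (p.getD d 0 - 1)) j
            (if dic.contains d then dic.modify d 0 (· + 1) else dic.insert d 1)
            (amt - d)
        else payLoop x p (j+1) dic amt
  else dic.items
termination_by (x.length - j) + pocketMeasure p
decreasing_by
  · have hj : j < x.length := (List.getElem?_eq_some_iff.1 hx).1
    omega
  · have hcon : p.contains d = true := by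
      by_contra hc
      rw [PySem.Dict.getD_of_not_contains p 0 (by simpa using hc)] at *
      simp_all
    have := pocketMeasure_insert_lt p d (p.getD d 0 - 1) hcon (by omega)
    omega
  · have hj : j < x.length := (List.getElem?_eq_some_iff.1 hx).1
    omega

def pay (pocket : List (Int × Int)) (amt : Int) : List (Int × Int) :=
  let p := PySem.Dict.mk pocket
  -- x = sorted(pocket)[::-1]; xs[::-1] is reversal (PySem.List.slice?_none_none_neg_one)
  let x := (PySem.List.sorted p.keys (fun k => k) false).reverse
  payLoop x p 0 PySem.Dict.empty amt

-- ===== PORT B =====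
-- one descending pass; per denomination take k = min(count, rem // d) at once;
-- break when rem <= 0 (paid) or d <= 0 (nonpositive denominations cannot reduce a positive rest)
def payAltLoop (p : PySem.Dict Int Int) (ds : List Int) (rem : Int)
    (res : PySem.Dict Int Int) : PySem.Dict Int Int × Int :=
  match ds with
  | [] => (res, rem)
  | d :: ds' =>
    if rem ≤ 0 then (res, rem)
    else if d ≤ 0 then (res, rem)
    else
      let k := min (p.getD d 0) (PySem.Int.floordiv rem d)
      if k > 0 then payAltLoop p ds' (rem - k * d) (res.insert d k)
      else payAltLoop p ds' rem res

def pay_alt (pocket : List (Int × Int)) (amt : Int) : List (Int × Int) :=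
  let p := PySem.Dict.mk pocket
  -- for d in sorted(pocket)[::-1]
  let x := (PySem.List.sorted p.keys (fun k => k) false).reverse
  let out := payAltLoop p x amt PySem.Dict.empty
  if out.2 = 0 then out.1.items else []

-- ===== PRECONDITION & SPEC =====
-- For a positive amount, Pre_ restricts the pocket to the task's natural domain — unique keys (the
-- argument is a Python dict), positive denominations and nonnegative coin counts: outside it A can
-- raise IndexError (negative denominations let amt grow past already-skipped coins, negative counts
-- send its availability sum r past the r == 0 exit), and where A still returns there the two
-- values need not match: with a negative count the r-sum can cancel to 0, so A stops and returns {}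
-- where B pays (cites in the claim).
def Pre_pay (pocket : List (Int × Int)) (amt : Int) : Prop :=
  amt ≤ 0 ∨ ((pocket.map Prod.fst).Nodup ∧ ∀ kv ∈ pocket, 1 ≤ kv.1 ∧ 0 ≤ kv.2)
instance (pocket : List (Int × Int)) (amt : Int) : Decidable (Pre_pay pocket amt) := by
  unfold Pre_pay; infer_instance
def pvWitness_pay : (List (Int × Int)) × Int := ([(1, 3), (5, 2), (2, 1)], 9)
def Spec_pay (pocket : List (Int × Int)) (amt : Int) (out : List (Int × Int)) : Prop := out = pay_alt pocket amt
instance (pocket : List (Int × Int)) (amt : Int) (out : List (Int × Int)) : Decidable (Spec_pay pocket amt out) := by unfold Spec_pay; infer_instance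

-- ===== CLAIM (what is proved, stated in full; the proofs are below) =====
def Claim_equal_pay : Prop := ∀ (pocket : List (Int × Int)) (amt : Int), Dom_pay pocket amt → Pre_pay pocket amt → Spec_pay pocket amt (pay pocket amt)

-- ===== LEMMAS AND PROOFS =====

theorem sum_map_le (ks : List Int) (f g : Int → Nat)
    (h : ∀ x ∈ ks, g x ≤ f x) : (ks.map g).sum ≤ (ks.map f).sum := by
  induction ks with
  | nil => simp
  | cons a t ih =>
      simp only [List.map_cons, List.sum_cons]
      have := ih (fun x hx => h x (List.mem_cons_of_mem a hx))
      have := h a (List.mem_cons_self ..)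
      omega

theorem getD_insert_contained_le (p : PySem.Dict Int Int) (d v : Int)
    (hd : p.contains d = true) (hv : v.toNat ≤ (p.getD d 0).toNat) :
    pocketMeasure (p.insert d v) ≤ pocketMeasure p := by
  unfold pocketMeasure
  rw [keys_insert_contained p d v hd]
  apply sum_map_le
  intro x _
  by_cases hx : x = d
  · subst hx; rw [PySem.Dict.getD_insert_self p x v 0]; exact hv
  · rw [PySem.Dict.getD_insert_of_ne p v 0 hx]

-- the result of B's loop packaged the way pay_alt consumes it
def altRes (p : PySem.Dict Int Int) (ds : List Int) (rem : Int)
    (res : PySem.Dict Int Int) : List (Int × Int) :=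
  if (payAltLoop p ds rem res).2 = 0 then (payAltLoop p ds rem res).1.items else []

theorem pay_alt_eq (pocket : List (Int × Int)) (amt : Int) :
    pay_alt pocket amt = altRes (PySem.Dict.mk pocket)
      ((PySem.List.sorted (PySem.Dict.mk pocket).keys (fun k => k) false).reverse)
      amt PySem.Dict.empty := by
  rfl

theorem foldl_avail (amt : Int) (f : Int → Int) :
    ∀ (ks : List Int) (a : Int),
      ks.foldl (fun r k => if k ≤ amt then r + f k else r) a
        = a + ((ks.filter (fun k => decide (k ≤ amt))).map f).sum := by
  intro ks
  induction ks with
  | nil => intro a; simp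
  | cons b t ih =>
      intro a
      by_cases hb : b ≤ amt
      · simp [hb, ih]
        ring
      · simp [hb, ih]

theorem payAvail_eq (p : PySem.Dict Int Int) (amt : Int) :
    payAvail p amt
      = ((p.keys.filter (fun k => decide (k ≤ amt))).map (fun k => p.getD k 0)).sum := by
  unfold payAvail
  rw [foldl_avail]
  ring

theorem int_sum_zero : ∀ (l : List Int), (∀ v ∈ l, 0 ≤ v) → l.sum = 0 → ∀ v ∈ l, v = 0 := by
  intro l
  induction l with
  | nil => simp
  | cons a t ih =>
      intro hpos hsum v hv
      have hts : 0 ≤ t.sum := List.sum_nonneg (fun x hx => hpos x (List.mem_cons_of_mem _ hx))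
      have ha : 0 ≤ a := hpos a (List.mem_cons_self ..)
      simp only [List.sum_cons] at hsum
      rcases List.mem_cons.1 hv with rfl | hv'
      · omega
      · exact ih (fun x hx => hpos x (List.mem_cons_of_mem _ hx)) (by omega) v hv'

theorem getD_nonneg (p : PySem.Dict Int Int)
    (hvals : ∀ kv ∈ p.items, 0 ≤ kv.2) (k : Int) : 0 ≤ p.getD k 0 := by
  rw [PySem.Dict.getD_eq_get?_getD]
  cases hg : p.get? k with
  | none => simp
  | some v =>
      have := PySem.Dict.mem_items_of_get?_eq_some (d := p) hg
      simpa using hvals _ this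

theorem avail_zero (p : PySem.Dict Int Int) (amt : Int)
    (hvals : ∀ kv ∈ p.items, 0 ≤ kv.2) (h : payAvail p amt = 0) :
    ∀ k ∈ p.keys, k ≤ amt → p.getD k 0 = 0 := by
  intro k hk hle
  rw [payAvail_eq] at h
  refine int_sum_zero _ ?_ h _ ?_
  · intro v hv
    obtain ⟨k', _, rfl⟩ := List.mem_map.1 hv
    exact getD_nonneg p hvals k'
  · exact List.mem_map_of_mem (List.mem_filter.2 ⟨hk, by simpa using hle⟩)

theorem avail_pos (p : PySem.Dict Int Int) (amt : Int)
    (hvals : ∀ kv ∈ p.items, 0 ≤ kv.2) (h : payAvail p amt ≠ 0) :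
    ∃ k ∈ p.keys, k ≤ amt ∧ 0 < p.getD k 0 := by
  by_contra hcon
  push Not at hcon
  apply h
  rw [payAvail_eq]
  have : ∀ v ∈ (p.keys.filter (fun k => decide (k ≤ amt))).map (fun k => p.getD k 0), v = 0 := by
    intro v hv
    obtain ⟨k', hk', rfl⟩ := List.mem_map.1 hv
    have hm := List.mem_filter.1 hk'
    have hle : k' ≤ amt := by simpa using hm.2
    have := hcon k' hm.1 hle
    have := getD_nonneg p hvals k'
    omega
  exact List.sum_eq_zero this

theorem avail_ne_zero (p : PySem.Dict Int Int) (amt k : Int)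
    (hvals : ∀ kv ∈ p.items, 0 ≤ kv.2)
    (hk : k ∈ p.keys) (hle : k ≤ amt) (hpos : 0 < p.getD k 0) :
    payAvail p amt ≠ 0 := by
  intro h
  have := avail_zero p amt hvals h k hk hle
  omega

theorem key_nonneg (p : PySem.Dict Int Int)
    (hvals : ∀ kv ∈ p.items, 0 ≤ kv.1 ∧ 0 ≤ kv.2) {k : Int} (hk : k ∈ p.keys) : 0 ≤ k := by
  simp only [PySem.Dict.keys] at hk
  obtain ⟨kv, hkv, rfl⟩ := List.mem_map.1 hk
  exact (hvals kv hkv).1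

theorem alt_zero (p : PySem.Dict Int Int) :
    ∀ (ds : List Int) (res : PySem.Dict Int Int), payAltLoop p ds 0 res = (res, 0) := by
  intro ds res
  cases ds with
  | nil => rfl
  | cons d t => simp [payAltLoop]

theorem alt_noop (p : PySem.Dict Int Int) :
    ∀ (ds : List Int) (rem : Int) (res : PySem.Dict Int Int), 0 < rem →
      (∀ d ∈ ds, d ≤ 0 ∨ p.getD d 0 ≤ 0 ∨ rem < d) →
      payAltLoop p ds rem res = (res, rem) := by
  intro ds
  induction ds with
  | nil => intro rem res _ _; rfl
  | cons d t ih =>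
      intro rem res hrem hall
      by_cases hdz : d ≤ 0
      · simp only [payAltLoop, if_neg (not_le.2 hrem), if_pos hdz]
      · have hcase : p.getD d 0 ≤ 0 ∨ rem < d :=
          (hall d (List.mem_cons_self ..)).resolve_left hdz
        have hknp : ¬ (min (p.getD d 0) (PySem.Int.floordiv rem d) > 0) := by
          rcases hcase with hle | hlt
          · have := min_le_left (p.getD d 0) (PySem.Int.floordiv rem d); omega
          · have hfd : PySem.Int.floordiv rem d = 0 := by
              rw [PySem.Int.floordiv_eq_ediv_of_pos (by omega)]
              exact Int.ediv_eq_zero_of_lt (by omega) hlt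
            have := min_le_right (p.getD d 0) (PySem.Int.floordiv rem d)
            omega
        simp only [payAltLoop, if_neg (not_le.2 hrem), if_neg hdz, if_neg hknp]
        exact ih rem res hrem (fun e he => hall e (List.mem_cons_of_mem _ he))

theorem alt_congr (p q : PySem.Dict Int Int) :
    ∀ (ds : List Int) (rem : Int) (res : PySem.Dict Int Int),
      (∀ d ∈ ds, p.getD d 0 = q.getD d 0) →
      payAltLoop p ds rem res = payAltLoop q ds rem res := by
  intro ds
  induction ds with
  | nil => intro rem res _; rfl
  | cons d t ih =>
      intro rem res hall
      simp only [payAltLoop, hall d (List.mem_cons_self ..)]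
      by_cases hrem : rem ≤ 0
      · simp [hrem]
      · rw [if_neg hrem, if_neg hrem]
        by_cases hdz : d ≤ 0
        · rw [if_pos hdz, if_pos hdz]
        · rw [if_neg hdz, if_neg hdz]
          by_cases hk : min (q.getD d 0) (PySem.Int.floordiv rem d) > 0
          · rw [if_pos hk, if_pos hk]
            exact ih _ _ (fun e he => hall e (List.mem_cons_of_mem _ he))
          · rw [if_neg hk, if_neg hk]
            exact ih _ _ (fun e he => hall e (List.mem_cons_of_mem _ he))

theorem map_if_self : ∀ (l : List (Int × Int)) (d v : Int),
    (l.map (fun q => q.1)).Nodup → (d, v) ∈ l →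
    l.map (fun q => if (q.1 == d) = true then (d, v) else q) = l := by
  intro l
  induction l with
  | nil => simp
  | cons a t ih =>
      intro d v hnd hmem
      simp only [List.map_cons, List.nodup_cons] at hnd ⊢
      rcases List.mem_cons.1 hmem with rfl | hmem'
      · simp only [beq_self_eq_true, if_pos]
        have hnot : ∀ q ∈ t, q.1 ≠ d := by
          intro q hq he
          apply hnd.1
          show d ∈ t.map (fun q => q.1)
          rw [← he]
          exact List.mem_map_of_mem hq
        have htail : t.map (fun q => if (q.1 == d) = true then (d, v) else q) = t := by
          refine List.map_congr_left (fun q hq => ?_) |>.trans (List.map_id t)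
          rw [if_neg (by simpa using hnot q hq)]
          rfl
        rw [htail]
      · have hne : ¬ (a.1 == d) = true := by
          intro hbeq
          simp only [beq_iff_eq] at hbeq
          apply hnd.1
          have : d ∈ t.map (fun q => q.1) := List.mem_map_of_mem hmem'
          rw [hbeq]
          exact this
        rw [if_neg hne, ih d v hnd.2 hmem']

theorem insert_self_eq (p : PySem.Dict Int Int) (d : Int)
    (hnd : p.keys.Nodup) (hc : p.contains d = true) :
    p.insert d (p.getD d 0) = p := by
  apply PySem.Dict.ext
  rw [PySem.Dict.items_insert_of_contains p _ hc]
  have hsome : (p.get? d).isSome := by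
    rw [← PySem.Dict.contains_eq_isSome_get?, hc]
  obtain ⟨v, hv⟩ := Option.isSome_iff_exists.1 hsome
  have hmem : (d, v) ∈ p.items := PySem.Dict.mem_items_of_get?_eq_some p hv
  have hgd : p.getD d 0 = v := by
    rw [PySem.Dict.getD_eq_get?_getD, hv]; rfl
  rw [hgd]
  exact map_if_self p.items d v (by simpa [PySem.Dict.keys] using hnd) hmem

theorem modify_insert_collapse (dic0 : PySem.Dict Int Int) (d m : Int) :
    (dic0.insert d m).modify d 0 (· + 1) = dic0.insert d (m + 1) := by
  have h1 : (dic0.insert d m).modify d 0 (· + 1)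
      = (dic0.insert d m).insert d ((dic0.insert d m).getD d 0 + 1) := rfl
  rw [h1, PySem.Dict.getD_insert_self, PySem.Dict.insert_insert_self]

theorem payLoop_done (x : List Int) (p : PySem.Dict Int Int) (j : Nat)
    (dic : PySem.Dict Int Int) (amt : Int) (h : ¬ amt > 0) :
    payLoop x p j dic amt = dic.items := by
  rw [payLoop.eq_def, if_neg h]

theorem payLoop_fail (x : List Int) (p : PySem.Dict Int Int) (j : Nat)
    (dic : PySem.Dict Int Int) (amt : Int) (h1 : amt > 0) (h2 : payAvail p amt = 0) :
    payLoop x p j dic amt = [] := by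
  rw [payLoop.eq_def, if_pos h1, if_pos h2]

theorem payLoop_step_take (x : List Int) (p : PySem.Dict Int Int) (j : Nat)
    (dic : PySem.Dict Int Int) (amt d : Int)
    (h1 : amt > 0) (h2 : payAvail p amt ≠ 0) (hx : x[j]? = some d)
    (h3 : ¬ d > amt) (h4 : p.getD d 0 > 0) :
    payLoop x p j dic amt = payLoop x (p.insert d (p.getD d 0 - 1)) j
      (if dic.contains d then dic.modify d 0 (· + 1) else dic.insert d 1) (amt - d) := by
  rw [payLoop.eq_def, if_pos h1, if_neg h2]
  rw [hx]
  split
  next heq => exact absurd heq (by simp)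
  next d' heq =>
    injection heq with heq'
    subst heq'
    rw [if_neg h3, if_pos h4]

theorem payLoop_step_skip (x : List Int) (p : PySem.Dict Int Int) (j : Nat)
    (dic : PySem.Dict Int Int) (amt d : Int)
    (h1 : amt > 0) (h2 : payAvail p amt ≠ 0) (hx : x[j]? = some d)
    (h3 : d > amt ∨ ¬ p.getD d 0 > 0) :
    payLoop x p j dic amt = payLoop x p (j+1) dic amt := by
  rw [payLoop.eq_def, if_pos h1, if_neg h2]
  rw [hx]
  split
  next heq => exact absurd heq (by simp)
  next d' heq =>
    injection heq with heq'
    subst heq'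
    by_cases hgt : d > amt
    · rw [if_pos hgt]
    · rw [if_neg hgt, if_neg (h3.resolve_left hgt)]

-- A takes the coins of one denomination one at a time; n unit steps at denomination d = x[j].
theorem consume (x : List Int) (d : Int) (j : Nat) (hd0 : 0 ≤ d) (hx : x[j]? = some d) :
    ∀ (n : Nat) (p dic0 : PySem.Dict Int Int) (amt m c : Int),
      p.getD d 0 = c → p.contains d = true → p.keys.Nodup →
      (∀ kv ∈ p.items, 0 ≤ kv.1 ∧ 0 ≤ kv.2) →
      (n : Int) ≤ c → (n : Int) * d ≤ amt → (n = 0 ∨ 0 < amt - ((n : Int) - 1) * d) → 0 ≤ amt →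
      payLoop x p j (dic0.insert d m) amt
        = payLoop x (p.insert d (c - n)) j (dic0.insert d (m + n)) (amt - n * d) := by
  intro n
  induction n with
  | zero =>
      intro p dic0 amt m c hc hcon hnd hvals _ _ _ _
      rw [show c - ((0:Nat):Int) = c by push_cast; ring, ← hc, insert_self_eq p d hnd hcon]
      norm_num
  | succ n ih =>
      intro p dic0 amt m c hc hcon hnd hvals hnc hmul hstep0 hamt
      have hn0 : (0:Int) ≤ (n:Int) := Int.natCast_nonneg n
      have hstep1 : 0 < amt - (n : Int) * d := by
        rcases hstep0 with h | h
        · omega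
        · push_cast at h
          have : ((n:Int) + 1 - 1) * d = (n : Int) * d := by ring
          rw [this] at h
          exact h
      push_cast at hnc hmul ⊢
      have hamtpos : (0:Int) < amt := by nlinarith
      have hdle : d ≤ amt := by nlinarith
      have hcpos : 0 < c := by omega
      have hdmem : d ∈ p.keys := (PySem.Dict.contains_iff_mem_keys p d).1 hcon
      have hvals2 : ∀ kv ∈ p.items, 0 ≤ kv.2 := fun kv hkv => (hvals kv hkv).2
      have hrne : payAvail p amt ≠ 0 :=
        avail_ne_zero p amt d hvals2 hdmem hdle (by omega)
      rw [payLoop_step_take x p j _ amt d hamtpos hrne hx (by omega) (by omega)]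
      rw [if_pos (PySem.Dict.contains_insert_self dic0 d m), modify_insert_collapse, hc]
      have hstep := ih (p.insert d (c - 1)) dic0 (amt - d) (m + 1) (c - 1)
        (PySem.Dict.getD_insert_self p d (c-1) 0)
        (PySem.Dict.contains_insert_self p d (c-1))
        (by rw [keys_insert_contained p d (c-1) hcon]; exact hnd)
        (by
          intro kv hkv
          rcases (PySem.Dict.mem_items_insert p d (c-1) kv).1 hkv with rfl | ⟨hin, _⟩
          · exact ⟨hd0, by omega⟩
          · exact hvals kv hin)
        (by omega) (by nlinarith)
        (by
          right
          have : amt - d - ((n:Int) - 1) * d = amt - (n : Int) * d := by ring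
          rw [this]
          exact hstep1)
        (by omega)
      rw [hstep, PySem.Dict.insert_insert_self]
      have e1 : c - 1 - (n : Int) = c - ((n : Int) + 1) := by ring
      have e2 : m + 1 + (n : Int) = m + ((n : Int) + 1) := by ring
      have e3 : amt - d - (n : Int) * d = amt - ((n : Int) + 1) * d := by ring
      rw [e1, e2, e3]

-- in a descending list of distinct nonnegative keys, nothing follows a 0
theorem drop_nil_of_zero (x : List Int) (j : Nat) (hjlt : j < x.length)
    (hsorted : List.Pairwise (fun a b => b ≤ a) x) (hxnd : x.Nodup)
    (hnonneg : ∀ k ∈ x, 0 ≤ k) (hz : x[j] = 0) : x.drop (j+1) = [] := by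
  cases hdp : x.drop (j+1) with
  | nil => rfl
  | cons e t =>
    exfalso
    have he : e ∈ x.drop (j+1) := by rw [hdp]; exact List.mem_cons_self ..
    obtain ⟨i, hi, hei⟩ := List.mem_iff_getElem.1 he
    have hlen : j+1+i < x.length := by
      rw [List.length_drop] at hi; omega
    have hei' : x[j+1+i] = e := by
      rw [← hei, List.getElem_drop]
    have hrel : x[j+1+i] ≤ x[j] :=
      (List.pairwise_iff_getElem.1 hsorted) j (j+1+i) hjlt hlen (by omega)
    have hnn : 0 ≤ x[j+1+i] := hnonneg _ (List.getElem_mem hlen)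
    have heq : x[j+1+i] = x[j] := by omega
    have := (List.Nodup.getElem_inj_iff hxnd).1 heq
    omega

-- The heart of the equivalence: from any 'top of denomination' state of A's loop, A's unit-step
-- greedy and B's batched loop over the remaining suffix of x produce the same result.
theorem loop_eq (x : List Int) (p : PySem.Dict Int Int) (j : Nat)
    (dic : PySem.Dict Int Int) (amt : Int)
    (hnd : p.keys.Nodup) (hxnd : x.Nodup)
    (hsorted : List.Pairwise (fun a b => b ≤ a) x)
    (hkx : ∀ k ∈ p.keys, k ∈ x) (hxk : ∀ k ∈ x, k ∈ p.keys)
    (hvals : ∀ kv ∈ p.items, 0 ≤ kv.1 ∧ 0 ≤ kv.2)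
    (hj : ∀ i, i < j → ∀ (hi : i < x.length), p.getD x[i] 0 = 0 ∨ amt < x[i])
    (hdic : ∀ k ∈ x.drop j, dic.contains k = false)
    (hamt : 0 ≤ amt) :
    payLoop x p j dic amt = altRes p (x.drop j) amt dic := by
  have hvals2 : ∀ kv ∈ p.items, 0 ≤ kv.2 := fun kv h => (hvals kv h).2
  have hxnonneg : ∀ k ∈ x, 0 ≤ k := fun k hk => key_nonneg p hvals (hxk k hk)
  by_cases hgt : amt > 0
  case neg =>
    have h0 : amt = 0 := by omega
    subst h0
    rw [payLoop_done x p j dic 0 hgt]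
    unfold altRes
    rw [alt_zero p _ dic]
    simp
  case pos =>
  by_cases hr : payAvail p amt = 0
  · rw [payLoop_fail x p j dic amt hgt hr]
    have hcond : ∀ e ∈ x.drop j, e ≤ 0 ∨ p.getD e 0 ≤ 0 ∨ amt < e := by
      intro e he
      have hek : e ∈ p.keys := hxk e (List.mem_of_mem_drop he)
      by_cases hle : e ≤ amt
      · exact Or.inr (Or.inl (le_of_eq (avail_zero p amt hvals2 hr e hek hle)))
      · exact Or.inr (Or.inr (by omega))
    unfold altRes
    rw [alt_noop p (x.drop j) amt dic hgt hcond]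
    have hne0 : amt ≠ 0 := by omega
    simp [hne0]
  · obtain ⟨k0, hk0k, hk0le, hk0pos⟩ := avail_pos p amt hvals2 hr
    have hjlt : j < x.length := by
      obtain ⟨i, hi, hieq⟩ := List.mem_iff_getElem.1 (hkx k0 hk0k)
      rcases Nat.lt_or_ge i j with hij | hij
      · rcases hj i hij hi with h0 | h0
        · rw [hieq] at h0; omega
        · rw [hieq] at h0; omega
      · omega
    have hxj : x[j]? = some x[j] := List.getElem?_eq_getElem hjlt
    have hdx : x[j] ∈ x := List.getElem_mem hjlt
    have hdk : x[j] ∈ p.keys := hxk _ hdx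
    have hd0 : 0 ≤ x[j] := key_nonneg p hvals hdk
    have hdrop : x.drop j = x[j] :: x.drop (j+1) := List.drop_eq_getElem_cons hjlt
    have hdnotin : x[j] ∉ x.drop (j+1) := by
      have hnd2 : (x.drop j).Nodup := (List.drop_sublist j x).nodup hxnd
      rw [hdrop] at hnd2
      exact (List.nodup_cons.1 hnd2).1
    have hcontains : p.contains x[j] = true := (PySem.Dict.contains_iff_mem_keys p _).2 hdk
    have hc0 : 0 ≤ p.getD x[j] 0 := getD_nonneg p hvals2 _
    by_cases hcpos : p.getD x[j] 0 > 0
    case neg =>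
      have hcz : p.getD x[j] 0 = 0 := by omega
      rw [payLoop_step_skip x p j dic amt x[j] hgt hr hxj (Or.inr hcpos)]
      rw [loop_eq x p (j+1) dic amt hnd hxnd hsorted hkx hxk hvals
        (by
          intro i hij hi
          rcases Nat.lt_or_ge i j with h | h
          · exact hj i h hi
          · have hij' : i = j := by omega
            subst hij'
            exact Or.inl hcz)
        (fun k hk => hdic k (by rw [hdrop]; exact List.mem_cons_of_mem _ hk)) hamt]
      by_cases hdz : x[j] = 0
      · -- 0 is the last key: both suffix runs are no-ops ending with a failed rest
        have hds : x.drop (j+1) = [] := drop_nil_of_zero x j hjlt hsorted hxnd hxnonneg hdz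
        unfold altRes
        rw [hdrop, hds]
        simp only [payAltLoop]
        rw [if_neg (by omega : ¬ amt ≤ 0), if_pos (by omega : x[j] ≤ 0)]
      · have hfd : PySem.Int.floordiv amt x[j] = amt / x[j] :=
          PySem.Int.floordiv_eq_ediv_of_pos (by omega)
        unfold altRes
        rw [hdrop]
        have hkle : ¬ (min (p.getD x[j] 0) (PySem.Int.floordiv amt x[j]) > 0) := by
          have := min_le_left (p.getD x[j] 0) (PySem.Int.floordiv amt x[j])
          omega
        simp only [payAltLoop]
        rw [if_neg (by omega : ¬ amt ≤ 0), if_neg (by omega : ¬ x[j] ≤ 0), if_neg hkle]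
    case pos =>
      by_cases hgtd : x[j] > amt
      · rw [payLoop_step_skip x p j dic amt x[j] hgt hr hxj (Or.inl hgtd)]
        rw [loop_eq x p (j+1) dic amt hnd hxnd hsorted hkx hxk hvals
          (by
            intro i hij hi
            rcases Nat.lt_or_ge i j with h | h
            · exact hj i h hi
            · have hij' : i = j := by omega
              subst hij'
              exact Or.inr hgtd)
          (fun k hk => hdic k (by rw [hdrop]; exact List.mem_cons_of_mem _ hk)) hamt]
        unfold altRes
        rw [hdrop]
        have hfd : PySem.Int.floordiv amt x[j] = amt / x[j] :=
          PySem.Int.floordiv_eq_ediv_of_pos (by omega)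
        have hfd0 : PySem.Int.floordiv amt x[j] = 0 := by
          rw [hfd]; exact Int.ediv_eq_zero_of_lt hamt (by omega)
        have hkle : ¬ (min (p.getD x[j] 0) (PySem.Int.floordiv amt x[j]) > 0) := by
          have := min_le_right (p.getD x[j] 0) (PySem.Int.floordiv amt x[j])
          omega
        simp only [payAltLoop]
        rw [if_neg (by omega : ¬ amt ≤ 0), if_neg (by omega : ¬ x[j] ≤ 0), if_neg hkle]
      · have hdicd : dic.contains x[j] = false :=
          hdic _ (by rw [hdrop]; exact List.mem_cons_self ..)
        by_cases hdz : x[j] = 0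
        · -- zero denomination with coins left: A pockets them all without progress, then fails;
          -- B breaks at once; both return []
          rw [payLoop_step_take x p j dic amt x[j] hgt hr hxj hgtd hcpos]
          rw [if_neg (by simp [hdicd])]
          have hcons := consume x x[j] j hd0 hxj (p.getD x[j] 0 - 1).toNat
            (p.insert x[j] (p.getD x[j] 0 - 1)) dic (amt - x[j]) 1 (p.getD x[j] 0 - 1)
            (PySem.Dict.getD_insert_self p x[j] _ 0)
            (PySem.Dict.contains_insert_self p x[j] _)
            (by rw [keys_insert_contained p x[j] _ hcontains]; exact hnd)
            (by
              intro kv hkv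
              rcases (PySem.Dict.mem_items_insert p x[j] _ kv).1 hkv with rfl | ⟨hin, _⟩
              · exact ⟨hd0, by omega⟩
              · exact hvals kv hin)
            (by rw [Int.toNat_of_nonneg (by omega)])
            (by rw [Int.toNat_of_nonneg (by omega), hdz]; omega)
            (by
              right
              rw [Int.toNat_of_nonneg (by omega), hdz]
              simpa using hgt)
            (by omega)
          rw [hcons, PySem.Dict.insert_insert_self,
            Int.toNat_of_nonneg (by omega : (0:Int) ≤ p.getD x[j] 0 - 1)]
          have e1 : p.getD x[j] 0 - 1 - (p.getD x[j] 0 - 1) = 0 := by ring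
          have e3 : amt - x[j] - (p.getD x[j] 0 - 1) * x[j] = amt := by rw [hdz]; ring
          rw [e1, e3]
          have hfail : payAvail (p.insert x[j] 0) amt = 0 := by
            rw [payAvail_eq]
            apply List.sum_eq_zero
            intro v hv
            obtain ⟨e, hef, rfl⟩ := List.mem_map.1 hv
            have hm := List.mem_filter.1 hef
            have hekeys : e ∈ p.keys := by
              have := hm.1
              rwa [keys_insert_contained p x[j] 0 hcontains] at this
            have hle : e ≤ amt := by simpa using hm.2
            by_cases hed : e = x[j]
            · rw [hed]
              exact PySem.Dict.getD_insert_self p x[j] 0 0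
            · rw [PySem.Dict.getD_insert_of_ne p 0 0 hed]
              obtain ⟨i, hi, hei⟩ := List.mem_iff_getElem.1 (hkx e hekeys)
              rcases Nat.lt_trichotomy i j with h | h | h
              · rcases hj i h hi with h0 | h0
                · rwa [hei] at h0
                · rw [hei] at h0; omega
              · exfalso; subst h; exact hed hei.symm
              · exfalso
                have hds : x.drop (j+1) = [] :=
                  drop_nil_of_zero x j hjlt hsorted hxnd hxnonneg hdz
                have hlen0 : x.length - (j + 1) = 0 := by
                  have := congrArg List.length hds
                  simpa [List.length_drop] using this
                omega
          rw [payLoop_fail x _ j _ amt hgt hfail]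
          unfold altRes
          rw [hdrop]
          simp only [payAltLoop]
          rw [if_neg (by omega : ¬ amt ≤ 0), if_pos (by omega : x[j] ≤ 0)]
          simp [show amt ≠ 0 by omega]
        · -- positive denomination: take k = min(count, amt / d) coins in one batch
          have hd1 : 1 ≤ x[j] := by omega
          have hfd : PySem.Int.floordiv amt x[j] = amt / x[j] :=
            PySem.Int.floordiv_eq_ediv_of_pos (by omega)
          have hq1 : 1 ≤ amt / x[j] := (Int.le_ediv_iff_mul_le (by omega)).2 (by omega)
          have hk1 : 1 ≤ min (p.getD x[j] 0) (amt / x[j]) := le_min (by omega) hq1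
          have hkc : min (p.getD x[j] 0) (amt / x[j]) ≤ p.getD x[j] 0 := min_le_left _ _
          have hkq : min (p.getD x[j] 0) (amt / x[j]) ≤ amt / x[j] := min_le_right _ _
          have hkd : min (p.getD x[j] 0) (amt / x[j]) * x[j] ≤ amt :=
            (Int.le_ediv_iff_mul_le (by omega)).1 hkq
          rw [payLoop_step_take x p j dic amt x[j] hgt hr hxj hgtd hcpos]
          rw [if_neg (by simp [hdicd])]
          have hcons := consume x x[j] j hd0 hxj (min (p.getD x[j] 0) (amt / x[j]) - 1).toNat
            (p.insert x[j] (p.getD x[j] 0 - 1)) dic (amt - x[j]) 1 (p.getD x[j] 0 - 1)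
            (PySem.Dict.getD_insert_self p x[j] _ 0)
            (PySem.Dict.contains_insert_self p x[j] _)
            (by rw [keys_insert_contained p x[j] _ hcontains]; exact hnd)
            (by
              intro kv hkv
              rcases (PySem.Dict.mem_items_insert p x[j] _ kv).1 hkv with rfl | ⟨hin, _⟩
              · exact ⟨hd0, by omega⟩
              · exact hvals kv hin)
            (by rw [Int.toNat_of_nonneg (by omega)]; omega)
            (by rw [Int.toNat_of_nonneg (by omega)]; nlinarith)
            (by
              right
              rw [Int.toNat_of_nonneg (by omega)]
              nlinarith)
            (by omega)
          rw [hcons, PySem.Dict.insert_insert_self]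
          rw [Int.toNat_of_nonneg (by omega : (0:Int) ≤ min (p.getD x[j] 0) (amt / x[j]) - 1)]
          have e1 : p.getD x[j] 0 - 1 - (min (p.getD x[j] 0) (amt / x[j]) - 1)
              = p.getD x[j] 0 - min (p.getD x[j] 0) (amt / x[j]) := by ring
          have e2 : (1:Int) + (min (p.getD x[j] 0) (amt / x[j]) - 1)
              = min (p.getD x[j] 0) (amt / x[j]) := by ring
          have e3 : amt - x[j] - (min (p.getD x[j] 0) (amt / x[j]) - 1) * x[j]
              = amt - min (p.getD x[j] 0) (amt / x[j]) * x[j] := by ring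
          rw [e1, e2, e3]
          set c := p.getD x[j] 0 with hcc
          set k := min c (amt / x[j]) with hkk
          set pS := p.insert x[j] (c - k) with hpS
          set dicS := dic.insert x[j] k with hdicS
          set amtS := amt - k * x[j] with hamtS
          have hSnn : 0 ≤ amtS := by rw [hamtS]; linarith
          have hSle : amtS ≤ amt := by rw [hamtS]; nlinarith
          have hkeysS : pS.keys = p.keys := keys_insert_contained p x[j] _ hcontains
          have hvalsS : ∀ kv ∈ pS.items, 0 ≤ kv.1 ∧ 0 ≤ kv.2 := by
            intro kv hkv
            rcases (PySem.Dict.mem_items_insert p x[j] _ kv).1 hkv with rfl | ⟨hin, _⟩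
            · exact ⟨hd0, by omega⟩
            · exact hvals kv hin
          have hvalsS2 : ∀ kv ∈ pS.items, 0 ≤ kv.2 := fun kv h => (hvalsS kv h).2
          have hgDS : pS.getD x[j] 0 = c - k := PySem.Dict.getD_insert_self p x[j] _ 0
          have hRHS : altRes p (x.drop j) amt dic = altRes p (x.drop (j+1)) amtS dicS := by
            unfold altRes
            rw [hdrop]
            simp only [payAltLoop]
            rw [if_neg (by omega : ¬ amt ≤ 0), if_neg (by omega : ¬ x[j] ≤ 0), hfd, ← hcc, ← hkk,
              if_pos (by omega : k > 0), ← hamtS, ← hdicS]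
          rw [hRHS]
          by_cases hS : amtS = 0
          · rw [payLoop_done x pS j dicS amtS (by omega)]
            unfold altRes
            rw [hS, alt_zero]
            simp
          · have hSpos : 0 < amtS := by omega
            by_cases hr2 : payAvail pS amtS = 0
            · rw [payLoop_fail x pS j dicS amtS (by omega) hr2]
              have hcond2 : ∀ e ∈ x.drop (j+1), e ≤ 0 ∨ p.getD e 0 ≤ 0 ∨ amtS < e := by
                intro e he
                have hex : e ∈ x := List.mem_of_mem_drop (i := j) (by rw [hdrop]; exact List.mem_cons_of_mem _ he)
                have hek : e ∈ p.keys := hxk e hex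
                have hne : e ≠ x[j] := fun h => hdnotin (h ▸ he)
                have hgg : pS.getD e 0 = p.getD e 0 := PySem.Dict.getD_insert_of_ne p _ 0 hne
                by_cases hle : e ≤ amtS
                · refine Or.inr (Or.inl ?_)
                  rw [← hgg]
                  exact le_of_eq (avail_zero pS amtS hvalsS2 hr2 e (by rw [hkeysS]; exact hek) hle)
                · exact Or.inr (Or.inr (by omega))
              unfold altRes
              rw [alt_noop p (x.drop (j+1)) amtS dicS hSpos hcond2]
              simp [hS]
            · have hcase : x[j] > amtS ∨ c - k = 0 := by
                rcases le_or_gt c (amt / x[j]) with hcq | hcq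
                · right
                  have hkc' : k = c := by rw [hkk]; exact min_eq_left hcq
                  omega
                · left
                  have hkq2 : k = amt / x[j] := by rw [hkk]; exact min_eq_right (le_of_lt hcq)
                  have hdm := Int.ediv_add_emod amt x[j]
                  have hml := Int.emod_lt_of_pos amt (show (0:Int) < x[j] by omega)
                  rw [hamtS, hkq2]
                  nlinarith
              rw [payLoop_step_skip x pS j dicS amtS x[j] (by omega) hr2 hxj
                (by
                  rcases hcase with h | h
                  · exact Or.inl h
                  · exact Or.inr (by rw [hgDS]; omega))]
              rw [loop_eq x pS (j+1) dicS amtS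
                (by rw [hkeysS]; exact hnd) hxnd hsorted
                (by intro e he; exact hkx e (by rwa [hkeysS] at he))
                (by intro e he; rw [hkeysS]; exact hxk e he)
                hvalsS
                (by
                  intro i hij hi
                  rcases Nat.lt_or_ge i j with h | h
                  · have hne : x[i] ≠ x[j] := by
                      intro heq
                      have := (List.Nodup.getElem_inj_iff hxnd).1 heq
                      omega
                    rcases hj i h hi with h0 | h0
                    · exact Or.inl (by rw [PySem.Dict.getD_insert_of_ne p _ 0 hne]; exact h0)
                    · exact Or.inr (by omega)
                  · have hij' : i = j := by omega
                    subst hij'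
                    rcases hcase with h0 | h0
                    · exact Or.inr h0
                    · exact Or.inl (by rw [hgDS]; omega))
                (by
                  intro e he
                  have hne : e ≠ x[j] := fun h => hdnotin (h ▸ he)
                  have hd0' : dic.contains e = false :=
                    hdic e (by rw [hdrop]; exact List.mem_cons_of_mem _ he)
                  rw [hdicS, PySem.Dict.contains_insert]
                  simp [hne, hd0'])
                (by omega)]
              unfold altRes
              rw [alt_congr pS p (x.drop (j+1)) amtS dicS
                (by
                  intro e he
                  have hne : e ≠ x[j] := fun h => hdnotin (h ▸ he)
                  rw [hpS, PySem.Dict.getD_insert_of_ne p _ 0 hne])]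
termination_by (x.length - j) + pocketMeasure p
decreasing_by
  all_goals first
    | omega
    | (have hle := getD_insert_contained_le p x[j]
          (p.getD x[j] 0 - min (p.getD x[j] 0) (amt / x[j])) hcontains (by omega)
       omega)

theorem pay_spec : Claim_equal_pay := by
  intro pocket amt _ hpre
  unfold Spec_pay pay
  rw [pay_alt_eq]
  set p := PySem.Dict.mk pocket with hp
  set x := (PySem.List.sorted p.keys (fun k => k) false).reverse with hx
  show payLoop x p 0 PySem.Dict.empty amt = altRes p x amt PySem.Dict.empty
  by_cases hneg : amt ≤ 0
  · rw [payLoop_done x p 0 PySem.Dict.empty amt (by omega)]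
    have halt : ∀ (ds : List Int), payAltLoop p ds amt PySem.Dict.empty = (PySem.Dict.empty, amt) := by
      intro ds
      cases ds with
      | nil => rfl
      | cons d t => simp [payAltLoop, hneg]
    unfold altRes
    rw [halt x]
    by_cases h0 : amt = 0
    · rw [if_pos h0]
    · rw [if_neg h0]; rfl
  · obtain ⟨hnd0, hvals0⟩ := hpre.resolve_left hneg
    have hnd : p.keys.Nodup := by
      simpa [PySem.Dict.keys] using hnd0
    have hvals : ∀ kv ∈ p.items, 0 ≤ kv.1 ∧ 0 ≤ kv.2 :=
      fun kv hkv => ⟨by have := (hvals0 kv hkv).1; omega, (hvals0 kv hkv).2⟩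
    have hperm : (PySem.List.sorted p.keys (fun k => k) false).Perm p.keys :=
      PySem.List.sorted_perm _ _ _
    have hxnd : x.Nodup := by
      rw [hx, List.nodup_reverse]
      exact hperm.nodup_iff.2 hnd
    have hsorted : List.Pairwise (fun a b => b ≤ a) x := by
      rw [hx, List.pairwise_reverse]
      exact PySem.List.sorted_pairwise p.keys (fun k => k) 
    have hmemx : ∀ k, k ∈ x ↔ k ∈ p.keys := by
      intro k
      rw [hx, List.mem_reverse, PySem.List.mem_sorted]
    have hmain := loop_eq x p 0 PySem.Dict.empty amt hnd hxnd hsorted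
      (fun k hk => (hmemx k).2 hk) (fun k hk => (hmemx k).1 hk) hvals
      (by intro i hi _; omega)
      (by intro k _; exact PySem.Dict.contains_empty k)
      (by omega)
    rw [List.drop_zero] at hmain
    exact hmain
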